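-- pv_equiv track=rewrite | github.com/leostuchchi/assitant | backend/psyho_matrix.py | _build_pythagoras_matrix
-- ===== SOURCE A (Python) =====
-- def _build_pythagoras_matrix(day: int, month: int, year: int):
--     """Построение психоматрицы Пифагора 3x3"""
--     # Собираем все цифры даты рождения
--     all_digits = []
--     all_digits.extend([int(d) for d in str(day)])
--     all_digits.extend([int(d) for d in str(month)])
--     all_digits.extend([int(d) for d in str(year)])
--
--     # Считаем количество каждой цифры от 1 до 9
--     matrix = {}
--     for i in range(1, 10):
--         matrix[str(i)] = all_digits.count(i)
--
--     return matrix
-- ===== SOURCE B (Python) =====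
-- def _build_pythagoras_matrix(day: int, month: int, year: int):
--     """Психоматрица Пифагора: digits extracted arithmetically (divmod), no string scan."""
--     counts = [0] * 10
--     for n in (day, month, year):
--         while n > 0:
--             counts[n % 10] += 1
--             n //= 10
--     return {str(i): counts[i] for i in range(1, 10)}
-- ===== Notes on version B (the rewrite author's own statement) =====
-- stated objective: alternative
-- what changed: Drops string conversion entirely: digits are extracted arithmetically with divmod into an index table, replacing A's str()-and-int() digit list plus nine repeated all_digits.count(i) scans.
import Mathlib
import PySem

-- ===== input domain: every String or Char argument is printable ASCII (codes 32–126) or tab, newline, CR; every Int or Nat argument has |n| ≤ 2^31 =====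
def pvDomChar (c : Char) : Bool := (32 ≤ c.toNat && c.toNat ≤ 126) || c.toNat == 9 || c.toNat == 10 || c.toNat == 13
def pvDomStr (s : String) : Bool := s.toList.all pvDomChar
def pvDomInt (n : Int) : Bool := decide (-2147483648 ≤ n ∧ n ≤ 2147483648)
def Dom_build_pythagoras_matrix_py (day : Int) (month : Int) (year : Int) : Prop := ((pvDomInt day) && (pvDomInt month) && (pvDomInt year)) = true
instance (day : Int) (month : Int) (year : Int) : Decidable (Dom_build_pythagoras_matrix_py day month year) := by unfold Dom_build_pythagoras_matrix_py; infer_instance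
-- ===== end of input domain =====

-- B drops string conversion entirely: it extracts the digits arithmetically with divmod into an
-- index table, instead of A's str()/int() digit list with nine repeated .count(i) scans
-- (objective: alternative).

-- int(d) for a single character d; ofChars? is none exactly where Python raises ValueError
-- (e.g. '-'), and Pre_ excludes the inputs (negative components) on which that happens.
def pvToDigit (c : Char) : Int := (PySem.Int.ofChars? [c]).getD 0

-- ===== PORT A =====
def build_pythagoras_matrix_py (day : Int) (month : Int) (year : Int) : List (String × Int) :=
  -- all_digits = [] ; extend with [int(d) for d in str(day)] etc.
  let all_digits : List Int :=
    (([] : List Int) ++ (PySem.Int.toChars day).map pvToDigit)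
      ++ (PySem.Int.toChars month).map pvToDigit
      ++ (PySem.Int.toChars year).map pvToDigit
  -- matrix = {} ; for i in range(1, 10): matrix[str(i)] = all_digits.count(i)
  let matrix : PySem.Dict String Int :=
    (PySem.List.pyRange 1 10 1).foldl
      (fun d i => d.insert (PySem.Int.toStr i) (PySem.List.count all_digits i : Int))
      PySem.Dict.empty
  matrix.items

-- ===== PORT B =====
-- while n > 0: counts[n % 10] += 1; n //= 10   — fuel n.toNat bounds the iteration count
-- (one iteration per decimal digit, and a positive n has at most n digits); the list index
-- n % 10 is in range (0 ≤ n % 10 < 10, counts has length 10), so getD/set are exact.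
def pvLoop (fuel : Nat) (n : Int) (counts : List Int) : List Int :=
  match fuel with
  | 0 => counts
  | fuel + 1 =>
    if 0 < n then
      pvLoop fuel (PySem.Int.floordiv n 10)
        (counts.set (PySem.Int.mod n 10).toNat (counts.getD (PySem.Int.mod n 10).toNat 0 + 1))
    else counts

def build_pythagoras_matrix_py_alt (day : Int) (month : Int) (year : Int) : List (String × Int) :=
  -- counts = [0] * 10 ; for n in (day, month, year): while n > 0: …
  let counts := pvLoop year.toNat year (pvLoop month.toNat month (pvLoop day.toNat day (List.replicate 10 0)))
  -- {str(i): counts[i] for i in range(1, 10)} — distinct keys, insertion order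
  (PySem.List.pyRange 1 10 1).map (fun i => (PySem.Int.toStr i, counts.getD i.toNat 0))

-- ===== PRECONDITION & SPEC =====
-- Pre_ excludes negative components: there str(n) starts with '-' and int('-') raises ValueError in A.
def Pre_build_pythagoras_matrix_py (day : Int) (month : Int) (year : Int) : Prop :=
  0 ≤ day ∧ 0 ≤ month ∧ 0 ≤ year
instance (day : Int) (month : Int) (year : Int) : Decidable (Pre_build_pythagoras_matrix_py day month year) := by unfold Pre_build_pythagoras_matrix_py; infer_instance

def pvWitness_build_pythagoras_matrix_py : Int × Int × Int := (3, 12, 1990)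

def Spec_build_pythagoras_matrix_py (day : Int) (month : Int) (year : Int) (out : List (String × Int)) : Prop := out = build_pythagoras_matrix_py_alt day month year
instance (day : Int) (month : Int) (year : Int) (out : List (String × Int)) : Decidable (Spec_build_pythagoras_matrix_py day month year out) := by unfold Spec_build_pythagoras_matrix_py; infer_instance

-- ===== CLAIM (what is proved, stated in full; the proofs are below) =====
def Claim_equal_build_pythagoras_matrix_py : Prop := ∀ (day : Int) (month : Int) (year : Int), Dom_build_pythagoras_matrix_py day month year → Pre_build_pythagoras_matrix_py day month year → Spec_build_pythagoras_matrix_py day month year (build_pythagoras_matrix_py day month year)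

-- ===== LEMMAS AND PROOFS =====

-- count of digit k among the characters of L, as A sees it
def pvCnt (k : Int) (L : List Char) : Nat := L.countP (fun c => pvToDigit c == k)

-- A's result, expressed through per-digit character counts
lemma pv_A_eval (d m y : Int) :
    build_pythagoras_matrix_py d m y =
      [("1", (pvCnt 1 (PySem.Int.toChars d ++ PySem.Int.toChars m ++ PySem.Int.toChars y) : Int)),
       ("2", (pvCnt 2 (PySem.Int.toChars d ++ PySem.Int.toChars m ++ PySem.Int.toChars y) : Int)),
       ("3", (pvCnt 3 (PySem.Int.toChars d ++ PySem.Int.toChars m ++ PySem.Int.toChars y) : Int)),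
       ("4", (pvCnt 4 (PySem.Int.toChars d ++ PySem.Int.toChars m ++ PySem.Int.toChars y) : Int)),
       ("5", (pvCnt 5 (PySem.Int.toChars d ++ PySem.Int.toChars m ++ PySem.Int.toChars y) : Int)),
       ("6", (pvCnt 6 (PySem.Int.toChars d ++ PySem.Int.toChars m ++ PySem.Int.toChars y) : Int)),
       ("7", (pvCnt 7 (PySem.Int.toChars d ++ PySem.Int.toChars m ++ PySem.Int.toChars y) : Int)),
       ("8", (pvCnt 8 (PySem.Int.toChars d ++ PySem.Int.toChars m ++ PySem.Int.toChars y) : Int)),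
       ("9", (pvCnt 9 (PySem.Int.toChars d ++ PySem.Int.toChars m ++ PySem.Int.toChars y) : Int))] := by
  have hc : ∀ k : Int,
      PySem.List.count
        ((([] : List Int) ++ (PySem.Int.toChars d).map pvToDigit)
          ++ (PySem.Int.toChars m).map pvToDigit ++ (PySem.Int.toChars y).map pvToDigit) k
        = pvCnt k (PySem.Int.toChars d ++ PySem.Int.toChars m ++ PySem.Int.toChars y) := by
    intro k
    simp [PySem.List.count, List.count, pvCnt, List.countP_map, List.countP_append, Function.comp_def]
  simp only [build_pythagoras_matrix_py]
  rw [show PySem.List.pyRange 1 10 1 = ([1,2,3,4,5,6,7,8,9] : List Int) from by decide]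
  simp only [List.foldl_cons, List.foldl_nil, hc]
  rfl

-- int(c) of the decimal digit characters
lemma pv_toDigit_digitChar : ∀ r < 10, pvToDigit (Nat.digitChar r) = r := by decide

-- A's per-digit character count over str(m) is the digit count of m, for digits 1..9
lemma pv_cnt_digits (k : Nat) (hk1 : 1 ≤ k) (m : Nat) :
    pvCnt (k : Int) (Nat.toDigits 10 m) = ((Nat.digits 10 m).count k : Nat) := by
  induction m using Nat.strong_induction_on with
  | _ m ih =>
    by_cases hm : m < 10
    · rw [Nat.toDigits_of_lt_base hm]
      rcases Nat.eq_zero_or_pos m with h0 | hpos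
      · subst h0
        simp [pvCnt, pv_toDigit_digitChar 0 (by omega)]
        all_goals omega
      · rw [Nat.digits_def' (by omega : (1:Nat) < 10) hpos, Nat.div_eq_of_lt hm, Nat.digits_zero]
        have hdc := pv_toDigit_digitChar m hm
        simp [pvCnt, hdc, List.count_cons, Nat.mod_eq_of_lt hm]
    · rw [Nat.toDigits_of_base_le (by omega) (by omega),
          Nat.digits_def' (by omega : (1:Nat) < 10) (by omega : 0 < m)]
      have hr : m % 10 < 10 := Nat.mod_lt _ (by omega)
      have hdc := pv_toDigit_digitChar (m % 10) hr
      simp only [pvCnt] at ih ⊢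
      rw [List.countP_append, ih (m / 10) (Nat.div_lt_self (by omega) (by omega)),
          List.count_cons]
      simp [hdc]
      all_goals by_cases hmk : m % 10 = k <;> simp [hmk] <;> omega

-- the list update counts[r] += 1 at each literal index r
lemma pv_upd0 (a0 a1 a2 a3 a4 a5 a6 a7 a8 a9 : Int) :
    [a0, a1, a2, a3, a4, a5, a6, a7, a8, a9].set 0
        ([a0, a1, a2, a3, a4, a5, a6, a7, a8, a9].getD 0 0 + 1)
      = [a0 + 1, a1, a2, a3, a4, a5, a6, a7, a8, a9] := rfl
lemma pv_upd1 (a0 a1 a2 a3 a4 a5 a6 a7 a8 a9 : Int) :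
    [a0, a1, a2, a3, a4, a5, a6, a7, a8, a9].set 1
        ([a0, a1, a2, a3, a4, a5, a6, a7, a8, a9].getD 1 0 + 1)
      = [a0, a1 + 1, a2, a3, a4, a5, a6, a7, a8, a9] := rfl
lemma pv_upd2 (a0 a1 a2 a3 a4 a5 a6 a7 a8 a9 : Int) :
    [a0, a1, a2, a3, a4, a5, a6, a7, a8, a9].set 2
        ([a0, a1, a2, a3, a4, a5, a6, a7, a8, a9].getD 2 0 + 1)
      = [a0, a1, a2 + 1, a3, a4, a5, a6, a7, a8, a9] := rfl
lemma pv_upd3 (a0 a1 a2 a3 a4 a5 a6 a7 a8 a9 : Int) :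
    [a0, a1, a2, a3, a4, a5, a6, a7, a8, a9].set 3
        ([a0, a1, a2, a3, a4, a5, a6, a7, a8, a9].getD 3 0 + 1)
      = [a0, a1, a2, a3 + 1, a4, a5, a6, a7, a8, a9] := rfl
lemma pv_upd4 (a0 a1 a2 a3 a4 a5 a6 a7 a8 a9 : Int) :
    [a0, a1, a2, a3, a4, a5, a6, a7, a8, a9].set 4
        ([a0, a1, a2, a3, a4, a5, a6, a7, a8, a9].getD 4 0 + 1)
      = [a0, a1, a2, a3, a4 + 1, a5, a6, a7, a8, a9] := rfl
lemma pv_upd5 (a0 a1 a2 a3 a4 a5 a6 a7 a8 a9 : Int) :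
    [a0, a1, a2, a3, a4, a5, a6, a7, a8, a9].set 5
        ([a0, a1, a2, a3, a4, a5, a6, a7, a8, a9].getD 5 0 + 1)
      = [a0, a1, a2, a3, a4, a5 + 1, a6, a7, a8, a9] := rfl
lemma pv_upd6 (a0 a1 a2 a3 a4 a5 a6 a7 a8 a9 : Int) :
    [a0, a1, a2, a3, a4, a5, a6, a7, a8, a9].set 6
        ([a0, a1, a2, a3, a4, a5, a6, a7, a8, a9].getD 6 0 + 1)
      = [a0, a1, a2, a3, a4, a5, a6 + 1, a7, a8, a9] := rfl
lemma pv_upd7 (a0 a1 a2 a3 a4 a5 a6 a7 a8 a9 : Int) :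
    [a0, a1, a2, a3, a4, a5, a6, a7, a8, a9].set 7
        ([a0, a1, a2, a3, a4, a5, a6, a7, a8, a9].getD 7 0 + 1)
      = [a0, a1, a2, a3, a4, a5, a6, a7 + 1, a8, a9] := rfl
lemma pv_upd8 (a0 a1 a2 a3 a4 a5 a6 a7 a8 a9 : Int) :
    [a0, a1, a2, a3, a4, a5, a6, a7, a8, a9].set 8
        ([a0, a1, a2, a3, a4, a5, a6, a7, a8, a9].getD 8 0 + 1)
      = [a0, a1, a2, a3, a4, a5, a6, a7, a8 + 1, a9] := rfl
lemma pv_upd9 (a0 a1 a2 a3 a4 a5 a6 a7 a8 a9 : Int) :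
    [a0, a1, a2, a3, a4, a5, a6, a7, a8, a9].set 9
        ([a0, a1, a2, a3, a4, a5, a6, a7, a8, a9].getD 9 0 + 1)
      = [a0, a1, a2, a3, a4, a5, a6, a7, a8, a9 + 1] := rfl

-- B's while-loop adds, entrywise, the decimal-digit counts of m to the 10-entry table
lemma pv_loop_digits (fuel : Nat) : ∀ (m : Nat), m ≤ fuel →
    ∀ (c0 c1 c2 c3 c4 c5 c6 c7 c8 c9 : Int),
    pvLoop fuel (m : Int) [c0, c1, c2, c3, c4, c5, c6, c7, c8, c9]
      = [c0 + ((Nat.digits 10 m).count 0 : Nat), c1 + ((Nat.digits 10 m).count 1 : Nat),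
         c2 + ((Nat.digits 10 m).count 2 : Nat), c3 + ((Nat.digits 10 m).count 3 : Nat),
         c4 + ((Nat.digits 10 m).count 4 : Nat), c5 + ((Nat.digits 10 m).count 5 : Nat),
         c6 + ((Nat.digits 10 m).count 6 : Nat), c7 + ((Nat.digits 10 m).count 7 : Nat),
         c8 + ((Nat.digits 10 m).count 8 : Nat), c9 + ((Nat.digits 10 m).count 9 : Nat)] := by
  induction fuel with
  | zero =>
    intro m hm c0 c1 c2 c3 c4 c5 c6 c7 c8 c9
    interval_cases m
    simp [pvLoop]
  | succ fuel ih =>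
    intro m hm c0 c1 c2 c3 c4 c5 c6 c7 c8 c9
    rcases Nat.eq_zero_or_pos m with h0 | hpos
    · subst h0; simp [pvLoop]
    · rw [show pvLoop (fuel + 1) (m : Int) [c0,c1,c2,c3,c4,c5,c6,c7,c8,c9]
            = pvLoop fuel (PySem.Int.floordiv (m : Int) 10)
                ([c0,c1,c2,c3,c4,c5,c6,c7,c8,c9].set (PySem.Int.mod (m : Int) 10).toNat
                  ([c0,c1,c2,c3,c4,c5,c6,c7,c8,c9].getD (PySem.Int.mod (m : Int) 10).toNat 0 + 1))
          from by rw [pvLoop, if_pos (by exact_mod_cast hpos)]]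
      rw [show PySem.Int.floordiv ((m : Nat) : Int) 10 = ((m / 10 : Nat) : Int) from by
            exact_mod_cast PySem.Int.floordiv_natCast m 10,
          show PySem.Int.mod ((m : Nat) : Int) 10 = ((m % 10 : Nat) : Int) from by
            exact_mod_cast PySem.Int.mod_natCast m 10,
          Int.toNat_natCast]
      have hdiv : m / 10 ≤ fuel := by
        have : m / 10 < m := Nat.div_lt_self hpos (by omega)
        omega
      have hdig : Nat.digits 10 m = m % 10 :: Nat.digits 10 (m / 10) :=
        Nat.digits_def' (by omega : (1:Nat) < 10) hpos
      rw [hdig]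
      have hr : m % 10 < 10 := Nat.mod_lt _ (by omega)
      set r := m % 10 with hrdef
      clear_value r
      interval_cases r <;>
        · simp only [pv_upd0, pv_upd1, pv_upd2, pv_upd3, pv_upd4, pv_upd5, pv_upd6, pv_upd7,
            pv_upd8, pv_upd9]
          rw [ih (m / 10) hdiv]
          simp
          all_goals omega

-- list indexing counts[i] at the literal indices 1..9
lemma pv_getD1 (a0 a1 a2 a3 a4 a5 a6 a7 a8 a9 : Int) :
    [a0, a1, a2, a3, a4, a5, a6, a7, a8, a9].getD ((1 : Int)).toNat 0 = a1 := rfl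
lemma pv_getD2 (a0 a1 a2 a3 a4 a5 a6 a7 a8 a9 : Int) :
    [a0, a1, a2, a3, a4, a5, a6, a7, a8, a9].getD ((2 : Int)).toNat 0 = a2 := rfl
lemma pv_getD3 (a0 a1 a2 a3 a4 a5 a6 a7 a8 a9 : Int) :
    [a0, a1, a2, a3, a4, a5, a6, a7, a8, a9].getD ((3 : Int)).toNat 0 = a3 := rfl
lemma pv_getD4 (a0 a1 a2 a3 a4 a5 a6 a7 a8 a9 : Int) :
    [a0, a1, a2, a3, a4, a5, a6, a7, a8, a9].getD ((4 : Int)).toNat 0 = a4 := rfl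
lemma pv_getD5 (a0 a1 a2 a3 a4 a5 a6 a7 a8 a9 : Int) :
    [a0, a1, a2, a3, a4, a5, a6, a7, a8, a9].getD ((5 : Int)).toNat 0 = a5 := rfl
lemma pv_getD6 (a0 a1 a2 a3 a4 a5 a6 a7 a8 a9 : Int) :
    [a0, a1, a2, a3, a4, a5, a6, a7, a8, a9].getD ((6 : Int)).toNat 0 = a6 := rfl
lemma pv_getD7 (a0 a1 a2 a3 a4 a5 a6 a7 a8 a9 : Int) :
    [a0, a1, a2, a3, a4, a5, a6, a7, a8, a9].getD ((7 : Int)).toNat 0 = a7 := rfl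
lemma pv_getD8 (a0 a1 a2 a3 a4 a5 a6 a7 a8 a9 : Int) :
    [a0, a1, a2, a3, a4, a5, a6, a7, a8, a9].getD ((8 : Int)).toNat 0 = a8 := rfl
lemma pv_getD9 (a0 a1 a2 a3 a4 a5 a6 a7 a8 a9 : Int) :
    [a0, a1, a2, a3, a4, a5, a6, a7, a8, a9].getD ((9 : Int)).toNat 0 = a9 := rfl

-- str(n) for a nonnegative Int, on the character-list side
lemma pv_toChars_nonneg (n : Int) (hn : 0 ≤ n) :
    PySem.Int.toChars n = Nat.toDigits 10 n.toNat := by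
  rw [PySem.Int.toChars, if_neg (by omega)]

-- ===== VERDICT (by name: the statement is the Claim_ definition above) =====
theorem build_pythagoras_matrix_py_spec : Claim_equal_build_pythagoras_matrix_py := by
  intro day month year _ hpre
  obtain ⟨hd, hm, hy⟩ := hpre
  show _ = _
  rw [pv_A_eval]
  simp only [build_pythagoras_matrix_py_alt]
  rw [show (List.replicate 10 (0:Int)) = [0,0,0,0,0,0,0,0,0,0] from rfl]
  rw [show (day : Int) = ((day.toNat : Nat) : Int) from (Int.toNat_of_nonneg hd).symm,
      show (month : Int) = ((month.toNat : Nat) : Int) from (Int.toNat_of_nonneg hm).symm,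
      show (year : Int) = ((year.toNat : Nat) : Int) from (Int.toNat_of_nonneg hy).symm]
  rw [Int.toNat_natCast, Int.toNat_natCast, Int.toNat_natCast]
  rw [pv_loop_digits day.toNat day.toNat le_rfl,
      pv_loop_digits month.toNat month.toNat le_rfl,
      pv_loop_digits year.toNat year.toNat le_rfl]
  rw [show PySem.List.pyRange 1 10 1 = ([1,2,3,4,5,6,7,8,9] : List Int) from by decide]
  simp only [List.map_cons, List.map_nil]
  have hcnt : ∀ k : Nat, 1 ≤ k →
      pvCnt (k : Int) (PySem.Int.toChars ((day.toNat : Nat) : Int)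
          ++ PySem.Int.toChars ((month.toNat : Nat) : Int)
          ++ PySem.Int.toChars ((year.toNat : Nat) : Int))
        = (Nat.digits 10 day.toNat).count k + (Nat.digits 10 month.toNat).count k
            + (Nat.digits 10 year.toNat).count k := by
    intro k hk
    rw [show ∀ (X Y Z : List Char), pvCnt (k : Int) (X ++ Y ++ Z)
          = pvCnt k X + pvCnt k Y + pvCnt k Z from fun X Y Z => by
            simp [pvCnt, List.countP_append, Nat.add_assoc]]
    rw [pv_toChars_nonneg _ (Int.natCast_nonneg _), pv_toChars_nonneg _ (Int.natCast_nonneg _),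
        pv_toChars_nonneg _ (Int.natCast_nonneg _), Int.toNat_natCast, Int.toNat_natCast,
        Int.toNat_natCast]
    rw [pv_cnt_digits k hk, pv_cnt_digits k hk, pv_cnt_digits k hk]
  have h1 := hcnt 1 (by omega)
  have h2 := hcnt 2 (by omega)
  have h3 := hcnt 3 (by omega)
  have h4 := hcnt 4 (by omega)
  have h5 := hcnt 5 (by omega)
  have h6 := hcnt 6 (by omega)
  have h7 := hcnt 7 (by omega)
  have h8 := hcnt 8 (by omega)
  have h9 := hcnt 9 (by omega)
  push_cast at h1 h2 h3 h4 h5 h6 h7 h8 h9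
  rw [pv_getD1, pv_getD2, pv_getD3, pv_getD4, pv_getD5, pv_getD6, pv_getD7, pv_getD8, pv_getD9]
  simp only [List.cons.injEq, Prod.mk.injEq, and_true]
  refine ⟨⟨?_, ?_⟩, ⟨?_, ?_⟩, ⟨?_, ?_⟩, ⟨?_, ?_⟩, ⟨?_, ?_⟩, ⟨?_, ?_⟩, ⟨?_, ?_⟩,
    ⟨?_, ?_⟩, ⟨?_, ?_⟩⟩
  all_goals first
    | rfl
    | decide
    | (rw [h1]; push_cast; ring)
    | (rw [h2]; push_cast; ring)
    | (rw [h3]; push_cast; ring)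
    | (rw [h4]; push_cast; ring)
    | (rw [h5]; push_cast; ring)
    | (rw [h6]; push_cast; ring)
    | (rw [h7]; push_cast; ring)
    | (rw [h8]; push_cast; ring)
    | (rw [h9]; push_cast; ring)
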